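-- pv_equiv track=rewrite | github.com/deathweaselx86/Slack-Seeker-API | app/helper.py | strip_terms
-- ===== SOURCE A (Python) =====
-- from string import ascii_letters, digits
--
-- def strip_terms(terms):
--     ''' convert each term in terms to just letters and numbers
--
--     terms - list of strings
--     '''
--     allowed_glyphs = ascii_letters + digits + "'"
--
--     stripped_terms = []
--     for term in terms:
--         stripped_term = ''
--         for letter in term:
--             if letter in allowed_glyphs:
--                 stripped_term += letter
--             else:
--                 stripped_terms.append(stripped_term)
--                 stripped_term = ''
--         if stripped_term:
--             stripped_terms.append(stripped_term)
--
--     return stripped_terms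
-- ===== SOURCE B (Python) =====
-- import re
--
-- _SEP = re.compile(r"[^A-Za-z0-9']")
--
-- def strip_terms(terms):
--     ''' convert each term in terms to just letters and numbers
--
--     terms - list of strings
--     '''
--     stripped_terms = []
--     for term in terms:
--         parts = _SEP.split(term)
--         if parts and parts[-1] == '':
--             parts.pop()
--         stripped_terms.extend(parts)
--     return stripped_terms
-- ===== Notes on version B (the rewrite author's own statement) =====
-- stated objective: idiomatic
-- what changed: Replaces the hand-written character loop with a running accumulator by a regex split on the disallowed-character class per term, popping the single trailing empty part.
import Mathlib
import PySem

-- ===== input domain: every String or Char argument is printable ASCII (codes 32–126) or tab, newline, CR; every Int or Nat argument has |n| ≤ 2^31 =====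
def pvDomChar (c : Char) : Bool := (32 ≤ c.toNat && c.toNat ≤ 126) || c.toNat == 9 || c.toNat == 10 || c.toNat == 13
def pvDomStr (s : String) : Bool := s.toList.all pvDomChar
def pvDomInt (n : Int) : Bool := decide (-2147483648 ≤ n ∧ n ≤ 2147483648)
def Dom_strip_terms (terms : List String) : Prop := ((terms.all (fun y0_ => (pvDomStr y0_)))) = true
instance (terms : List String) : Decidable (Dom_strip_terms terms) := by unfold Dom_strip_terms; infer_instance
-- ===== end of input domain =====

-- B replaces A's manual char loop with a per-term regex split on the disallowed class; same result, more idiomatic.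

-- ===== PORT A =====
-- `letter in allowed_glyphs` with allowed_glyphs = ascii_letters + digits + "'"
def pvAllowed (c : Char) : Bool :=
  ('a' ≤ c && c ≤ 'z') || ('A' ≤ c && c ≤ 'Z') || ('0' ≤ c && c ≤ '9') || c == '\''

def strip_terms (terms : List String) : List String :=
  terms.foldl (fun stripped_terms term =>
    let st := term.toList.foldl
      (fun (p : List String × List Char) letter =>
        if pvAllowed letter then (p.1, p.2 ++ [letter])
        else (p.1 ++ [String.ofList p.2], []))
      (stripped_terms, [])
    if st.2 ≠ [] then st.1 ++ [String.ofList st.2] else st.1) []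

-- ===== PORT B =====
-- hand port of re.split(r"[^A-Za-z0-9']", term): exact (splits at each disallowed char, keeps empty parts)
def pvReSplit (l : List Char) : List (List Char) :=
  match l with
  | [] => [[]]
  | c :: t =>
    if pvAllowed c then
      match pvReSplit t with
      | [] => [[c]]
      | s :: r => (c :: s) :: r
    else [] :: pvReSplit t

def strip_terms_alt (terms : List String) : List String :=
  terms.foldl (fun out term =>
    let parts := (pvReSplit term.toList).map String.ofList
    let parts := if parts ≠ [] ∧ parts.getLast? = some "" then parts.dropLast else parts
    out ++ parts) []

-- ===== PRECONDITION & SPEC =====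
def Spec_strip_terms (terms : List String) (out : List String) : Prop := out = strip_terms_alt terms
instance (terms : List String) (out : List String) : Decidable (Spec_strip_terms terms out) := by unfold Spec_strip_terms; infer_instance

-- ===== CLAIM (what is proved, stated in full; the proofs are below) =====
def Claim_equal_strip_terms : Prop := ∀ (terms : List String), Dom_strip_terms terms → Spec_strip_terms terms (strip_terms terms)

-- ===== LEMMAS AND PROOFS =====

theorem pvReSplit_ne_nil (l : List Char) : pvReSplit l ≠ [] := by
  cases l with
  | nil => simp [pvReSplit]
  | cons c t =>
    simp only [pvReSplit]
    split
    · cases h : pvReSplit t <;> simp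
    · simp

-- per-term B value, with the pending accumulator `cur` prefixed onto the first part
def pvBTerm (cur : List Char) (l : List Char) : List String :=
  let ps := match pvReSplit l with
            | [] => []
            | s :: r => (cur ++ s) :: r
  let ps := if ps.getLast? = some [] then ps.dropLast else ps
  ps.map String.ofList

theorem inner_eq (l : List Char) : ∀ (acc : List String) (cur : List Char),
    (fun st : List String × List Char =>
        if st.2 ≠ [] then st.1 ++ [String.ofList st.2] else st.1)
      (l.foldl
        (fun (p : List String × List Char) letter =>
          if pvAllowed letter then (p.1, p.2 ++ [letter])
          else (p.1 ++ [String.ofList p.2], []))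
        (acc, cur))
    = acc ++ pvBTerm cur l := by
  induction l with
  | nil =>
    intro acc cur
    simp only [List.foldl_nil, pvBTerm, pvReSplit]
    by_cases h : cur = [] <;> simp [h]
  | cons c t ih =>
    intro acc cur
    by_cases h : pvAllowed c = true
    · have := ih acc (cur ++ [c])
      simp only [List.foldl_cons, h, if_true] at this ⊢
      rw [this]
      congr 1
      simp only [pvBTerm, pvReSplit, h, if_true]
      cases hs : pvReSplit t with
      | nil => exact absurd hs (pvReSplit_ne_nil t)
      | cons s r => simp
    · have hb : pvAllowed c = false := by simpa using h
      have := ih (acc ++ [String.ofList cur]) []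
      simp only [List.foldl_cons, hb, Bool.false_eq_true, if_false] at this ⊢
      rw [this]
      have hps := pvReSplit_ne_nil t
      simp only [pvBTerm, pvReSplit, hb, Bool.false_eq_true, if_false]
      cases hs : pvReSplit t with
      | nil => exact absurd hs hps
      | cons s r =>
        simp only [List.nil_append, List.append_assoc]
        by_cases hl : ((s :: r).getLast? = some ([] : List Char))
        · have hgl : ((cur :: s :: r).getLast? = some ([] : List Char)) := by
            simpa [List.getLast?_cons_cons] using hl
          simp [hl, hgl, List.dropLast_cons_of_ne_nil]
        · have hgl : ¬ ((cur :: s :: r).getLast? = some ([] : List Char)) := by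
            simpa [List.getLast?_cons_cons] using hl
          simp [hl]

-- B's per-term parts (over Strings) equal pvBTerm [] l
theorem bparts_eq (l : List Char) :
    (let parts := (pvReSplit l).map String.ofList
     if parts ≠ [] ∧ parts.getLast? = some "" then parts.dropLast else parts)
    = pvBTerm [] l := by
  have hps := pvReSplit_ne_nil l
  cases hs : pvReSplit l with
  | nil => exact absurd hs hps
  | cons s r =>
    simp only [pvBTerm, hs, List.nil_append]
    by_cases hl : ((s :: r).getLast? = some ([] : List Char))
    · have hm : ((s :: r).map String.ofList).getLast? = some "" := by
        rw [List.getLast?_map, hl]; rfl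
      simp only [List.map_cons] at hm
      simp [hm, hl, List.map_dropLast]
    · have hm : ¬ (((s :: r).map String.ofList).getLast? = some "") := by
        rw [List.getLast?_map]
        intro hcon
        apply hl
        cases hgl : (s :: r).getLast? with
        | none => simp [hgl] at hcon
        | some x =>
          simp only [hgl, Option.map_some, Option.some.injEq] at hcon
          have hx : x = [] := by simpa using hcon
          simp [hx]
      simp only [List.map_cons] at hm
      simp [hm, hl]

theorem foldl_eq (terms : List String) : ∀ (acc : List String),
    terms.foldl (fun stripped_terms term =>
      let st := term.toList.foldl
        (fun (p : List String × List Char) letter =>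
          if pvAllowed letter then (p.1, p.2 ++ [letter])
          else (p.1 ++ [String.ofList p.2], []))
        (stripped_terms, [])
      if st.2 ≠ [] then st.1 ++ [String.ofList st.2] else st.1) acc
    = terms.foldl (fun out term =>
      let parts := (pvReSplit term.toList).map String.ofList
      let parts := if parts ≠ [] ∧ parts.getLast? = some "" then parts.dropLast else parts
      out ++ parts) acc := by
  induction terms with
  | nil => intro acc; rfl
  | cons term rest ih =>
    intro acc
    simp only [List.foldl_cons]
    rw [ih]
    congr 1
    exact (inner_eq term.toList acc []).trans
      (congrArg (fun ps => acc ++ ps) (bparts_eq term.toList).symm)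

-- ===== VERDICT (by name: the statement is the Claim_ definition above) =====
theorem strip_terms_spec : Claim_equal_strip_terms := by
  intro terms _
  unfold Spec_strip_terms strip_terms strip_terms_alt
  exact foldl_eq terms []
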